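-- pv_equiv track=rewrite | github.com/netfoxor/stock-chat-bi | fetch-data/fetch_stock_codes.py | to_ts_code
-- ===== SOURCE A (Python) =====
-- def to_ts_code(code: str) -> str:
--     """将 AkShare 的 6 位 code 规范为与 Tushare 类似的 ts_code（.SH/.SZ/.BJ）。"""
--     s = str(code).strip().upper()
--     if "." in s:
--         return s
--     d = "".join(ch for ch in s if ch.isdigit())
--     if len(d) < 6:
--         d = d.zfill(6)
--     elif len(d) > 6:
--         d = d[-6:]
--     p3 = d[:3]
--     if p3 in ("600", "601", "603", "605") or p3 in ("688", "689"):
--         return f"{d}.SH"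
--     if d.startswith("900"):
--         return f"{d}.SH"
--     if p3 in ("000", "001", "002", "003", "300", "301") or d.startswith("200"):
--         return f"{d}.SZ"
--     if d.startswith("920") or d.startswith("43") or d.startswith("83"):
--         return f"{d}.BJ"
--     if d.startswith("87") or d.startswith("88") or d.startswith("92"):
--         return f"{d}.BJ"
--     if d[0] in ("4", "8"):
--         return f"{d}.BJ"
--     if d[0] == "6":
--         return f"{d}.SH"
--     if d[0] in ("0", "1", "2", "3"):
--         return f"{d}.SZ"
--     return f"{d}.SZ"
-- ===== SOURCE B (Python) =====
-- _BANDS = [(400, "SZ"), (500, "BJ"), (600, "SZ"), (700, "SH"), (800, "SZ"),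
--           (900, "BJ"), (901, "SH"), (920, "SZ"), (930, "BJ")]
--
--
-- def to_ts_code(code: str) -> str:
--     s = str(code).strip().upper()
--     if "." in s:
--         return s
--     d = "".join(ch for ch in s if ch.isdigit()).zfill(6)[-6:]
--     # numeric value of the three leading digits; the exchange is constant on
--     # each thousand-block, so a scan over interval upper bounds classifies it
--     k = (ord(d[0]) - 48) * 100 + (ord(d[1]) - 48) * 10 + (ord(d[2]) - 48)
--     for top, ex in _BANDS:
--         if k < top:
--             return f"{d}.{ex}"
--     return f"{d}.SZ"
-- ===== Notes on version B (the rewrite author's own statement) =====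
-- stated objective: alternative
-- what changed: The nine-branch string-prefix cascade (tuple membership / startswith / d[0] tests) is replaced by arithmetic: B computes the numeric value k of the three leading digits and classifies by scanning a table of interval upper bounds (k<400 SZ, <500 BJ, <600 SZ, <700 SH, <800 SZ, <900 BJ, <901 SH, <920 SZ, <930 BJ, else SZ), correct because the exchange is constant on each thousand-block of codes.
import Mathlib
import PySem

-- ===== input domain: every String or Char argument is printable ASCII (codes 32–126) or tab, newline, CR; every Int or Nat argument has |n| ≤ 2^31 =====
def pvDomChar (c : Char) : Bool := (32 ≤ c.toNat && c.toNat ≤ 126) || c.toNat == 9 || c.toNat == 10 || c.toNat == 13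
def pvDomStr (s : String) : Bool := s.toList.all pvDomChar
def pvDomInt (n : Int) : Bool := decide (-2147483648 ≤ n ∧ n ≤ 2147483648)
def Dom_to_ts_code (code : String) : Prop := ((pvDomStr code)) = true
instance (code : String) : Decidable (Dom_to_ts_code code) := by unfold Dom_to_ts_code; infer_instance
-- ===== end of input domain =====

-- B replaces A's string-prefix cascade by arithmetic: the numeric value of the three
-- leading digits is classified against a table of interval upper bounds; objective: alternative.

-- ===== PORT A =====
def to_ts_code (code : String) : String :=
  -- str(code) is the identity on a str argument
  let s := PySem.Str.upper (PySem.Str.strip code)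
  if PySem.Str.isIn "." s then s
  else
    -- "".join(ch for ch in s if ch.isdigit()) kept as the filtered char list
    let d0 := s.toList.filter PySem.Chars.isdigit
    let d :=
      if d0.length < 6 then PySem.Chars.zfill d0 6
      else if 6 < d0.length then PySem.Chars.slice d0 (some (-6)) none
      else d0
    let p3 := PySem.Chars.slice d none (some 3)
    if p3 == "600".toList || p3 == "601".toList || p3 == "603".toList || p3 == "605".toList
        || (p3 == "688".toList || p3 == "689".toList) then String.ofList (d ++ ".SH".toList)
    else if PySem.Chars.startswith d "900".toList then String.ofList (d ++ ".SH".toList)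
    else if p3 == "000".toList || p3 == "001".toList || p3 == "002".toList || p3 == "003".toList
        || p3 == "300".toList || p3 == "301".toList
        || PySem.Chars.startswith d "200".toList then String.ofList (d ++ ".SZ".toList)
    else if PySem.Chars.startswith d "920".toList || PySem.Chars.startswith d "43".toList
        || PySem.Chars.startswith d "83".toList then String.ofList (d ++ ".BJ".toList)
    else if PySem.Chars.startswith d "87".toList || PySem.Chars.startswith d "88".toList
        || PySem.Chars.startswith d "92".toList then String.ofList (d ++ ".BJ".toList)
    -- d[0]: d always has length 6 here, so the IndexError branch (pyGet? = none) is unreachable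
    else if PySem.Chars.pyGet? d 0 == some '4' || PySem.Chars.pyGet? d 0 == some '8' then
      String.ofList (d ++ ".BJ".toList)
    else if PySem.Chars.pyGet? d 0 == some '6' then String.ofList (d ++ ".SH".toList)
    else if PySem.Chars.pyGet? d 0 == some '0' || PySem.Chars.pyGet? d 0 == some '1'
        || PySem.Chars.pyGet? d 0 == some '2' || PySem.Chars.pyGet? d 0 == some '3' then
      String.ofList (d ++ ".SZ".toList)
    else String.ofList (d ++ ".SZ".toList)

-- ===== PORT B =====
def pvBands : List (Int × String) :=
  [(400, "SZ"), (500, "BJ"), (600, "SZ"), (700, "SH"), (800, "SZ"),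
   (900, "BJ"), (901, "SH"), (920, "SZ"), (930, "BJ")]

-- the 'for top, ex in _BANDS' loop with its early return
def pvBandLoop (k : Int) : List (Int × String) → Option String
  | [] => none
  | (top, ex) :: rest => if k < top then some ex else pvBandLoop k rest

-- ord(d[i]) ported as Char.toNat (exact on code points); d always has length ≥ 6 after
-- zfill, so d[0], d[1], d[2] never raise and the .getD 0 fallback is unreachable
def pvOrd (d : List Char) (i : Int) : Int :=
  ((PySem.Chars.pyGet? d i).map (fun c => (c.toNat : Int))).getD 0

def to_ts_code_alt (code : String) : String :=
  let s := PySem.Str.upper (PySem.Str.strip code)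
  if PySem.Str.isIn "." s then s
  else
    let d := PySem.Chars.slice (PySem.Chars.zfill (s.toList.filter PySem.Chars.isdigit) 6)
      (some (-6)) none
    let k := (pvOrd d 0 - 48) * 100 + (pvOrd d 1 - 48) * 10 + (pvOrd d 2 - 48)
    match pvBandLoop k pvBands with
    | some ex => String.ofList (d ++ '.' :: ex.toList)
    | none => String.ofList (d ++ ".SZ".toList)

-- ===== PRECONDITION & SPEC =====
def Spec_to_ts_code (code : String) (out : String) : Prop := out = to_ts_code_alt code
instance (code : String) (out : String) : Decidable (Spec_to_ts_code code out) := by unfold Spec_to_ts_code; infer_instance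

-- ===== CLAIM (what is proved, stated in full; the proofs are below) =====
def Claim_equal_to_ts_code : Prop := ∀ (code : String), Dom_to_ts_code code → Spec_to_ts_code code (to_ts_code code)

-- ===== LEMMAS AND PROOFS =====

lemma pv_slice_neg6 (xs : List Char) :
    PySem.Chars.slice xs (some (-6)) none = xs.drop (xs.length - 6) := by
  simp only [PySem.Chars.slice, PySem.List.slice, PySem.List.clampIdx]
  split
  · split
    · have h0 : xs.length - 6 = 0 := by omega
      simp [h0]
    · have h1 : ((xs.length : Int) + -6).toNat = xs.length - 6 := by omega
      rw [h1]
      apply List.take_of_length_le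
      simp
  · omega

lemma pv_d_eq (e : List Char) :
    (if e.length < 6 then PySem.Chars.zfill e 6
     else if 6 < e.length then PySem.Chars.slice e (some (-6)) none
     else e)
    = PySem.Chars.slice (PySem.Chars.zfill e 6) (some (-6)) none := by
  have hz : (PySem.Chars.zfill e 6).length = max e.length 6 := PySem.Chars.length_zfill e 6
  rcases lt_trichotomy e.length 6 with h | h | h
  · rw [if_pos h, pv_slice_neg6]
    have : (PySem.Chars.zfill e 6).length - 6 = 0 := by omega
    rw [this, List.drop_zero]
  · have hzf : PySem.Chars.zfill e 6 = e := by
      unfold PySem.Chars.zfill; rw [if_pos (by omega)]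
    rw [if_neg (by omega), if_neg (by omega), hzf, pv_slice_neg6]
    simp [h]
  · have hzf : PySem.Chars.zfill e 6 = e := by
      unfold PySem.Chars.zfill; rw [if_pos (by omega)]
    rw [if_neg (by omega), if_pos h, hzf]

lemma pv_mem_zfill {c : Char} {cs : List Char} {w : Int}
    (h : c ∈ PySem.Chars.zfill cs w) : c = '0' ∨ c ∈ cs := by
  rcases cs with _ | ⟨a, rest⟩ <;> simp only [PySem.Chars.zfill] at h
  · split at h
    · right; exact h
    · simp only [List.mem_replicate] at h
      exact Or.inl h.2
  · split at h
    · right; exact h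
    · split at h
      · rcases List.mem_cons.mp h with rfl | h
        · right; simp
        · rcases List.mem_append.mp h with h' | h'
          · exact Or.inl (List.eq_of_mem_replicate h')
          · right; simp [h']
      · rcases List.mem_append.mp h with h' | h'
        · exact Or.inl (List.eq_of_mem_replicate h')
        · right; exact h'

lemma pv_digit10 {c : Char} (h : PySem.Chars.isdigit c = true) :
    c = '0' ∨ c = '1' ∨ c = '2' ∨ c = '3' ∨ c = '4' ∨ c = '5' ∨ c = '6' ∨ c = '7' ∨ c = '8' ∨ c = '9' := by
  simp only [PySem.Chars.isdigit, Bool.and_eq_true, decide_eq_true_eq] at h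
  obtain ⟨h1, h2⟩ := h
  rw [Char.le_def] at h1 h2
  have b1 : 48 ≤ c.val.toNat := h1
  have b2 : c.val.toNat ≤ 57 := h2
  interval_cases hv : c.val.toNat
  · exact Or.inl (Char.ext (UInt32.toNat_inj.mp (by rw [hv]; rfl)))
  · exact Or.inr (Or.inl (Char.ext (UInt32.toNat_inj.mp (by rw [hv]; rfl))))
  · exact Or.inr (Or.inr (Or.inl (Char.ext (UInt32.toNat_inj.mp (by rw [hv]; rfl)))))
  · exact Or.inr (Or.inr (Or.inr (Or.inl (Char.ext (UInt32.toNat_inj.mp (by rw [hv]; rfl))))))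
  · exact Or.inr (Or.inr (Or.inr (Or.inr (Or.inl (Char.ext (UInt32.toNat_inj.mp (by rw [hv]; rfl)))))))
  · exact Or.inr (Or.inr (Or.inr (Or.inr (Or.inr (Or.inl (Char.ext (UInt32.toNat_inj.mp (by rw [hv]; rfl))))))))
  · exact Or.inr (Or.inr (Or.inr (Or.inr (Or.inr (Or.inr (Or.inl (Char.ext (UInt32.toNat_inj.mp (by rw [hv]; rfl)))))))))
  · exact Or.inr (Or.inr (Or.inr (Or.inr (Or.inr (Or.inr (Or.inr (Or.inl (Char.ext (UInt32.toNat_inj.mp (by rw [hv]; rfl))))))))))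
  · exact Or.inr (Or.inr (Or.inr (Or.inr (Or.inr (Or.inr (Or.inr (Or.inr (Or.inl (Char.ext (UInt32.toNat_inj.mp (by rw [hv]; rfl)))))))))))
  · exact Or.inr (Or.inr (Or.inr (Or.inr (Or.inr (Or.inr (Or.inr (Or.inr (Or.inr ((Char.ext (UInt32.toNat_inj.mp (by rw [hv]; rfl))))))))))))

set_option maxHeartbeats 4000000 in
lemma pv_classify (D : List Char) (hlen : D.length = 6)
    (hdig : ∀ c ∈ D, PySem.Chars.isdigit c = true) :
    (let p3 := PySem.Chars.slice D none (some 3)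
     if p3 == "600".toList || p3 == "601".toList || p3 == "603".toList || p3 == "605".toList
         || (p3 == "688".toList || p3 == "689".toList) then String.ofList (D ++ ".SH".toList)
     else if PySem.Chars.startswith D "900".toList then String.ofList (D ++ ".SH".toList)
     else if p3 == "000".toList || p3 == "001".toList || p3 == "002".toList || p3 == "003".toList
         || p3 == "300".toList || p3 == "301".toList
         || PySem.Chars.startswith D "200".toList then String.ofList (D ++ ".SZ".toList)
     else if PySem.Chars.startswith D "920".toList || PySem.Chars.startswith D "43".toList
         || PySem.Chars.startswith D "83".toList then String.ofList (D ++ ".BJ".toList)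
     else if PySem.Chars.startswith D "87".toList || PySem.Chars.startswith D "88".toList
         || PySem.Chars.startswith D "92".toList then String.ofList (D ++ ".BJ".toList)
     else if PySem.Chars.pyGet? D 0 == some '4' || PySem.Chars.pyGet? D 0 == some '8' then
       String.ofList (D ++ ".BJ".toList)
     else if PySem.Chars.pyGet? D 0 == some '6' then String.ofList (D ++ ".SH".toList)
     else if PySem.Chars.pyGet? D 0 == some '0' || PySem.Chars.pyGet? D 0 == some '1'
         || PySem.Chars.pyGet? D 0 == some '2' || PySem.Chars.pyGet? D 0 == some '3' then
       String.ofList (D ++ ".SZ".toList)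
     else String.ofList (D ++ ".SZ".toList))
    = (let k := (pvOrd D 0 - 48) * 100 + (pvOrd D 1 - 48) * 10 + (pvOrd D 2 - 48)
       match pvBandLoop k pvBands with
       | some ex => String.ofList (D ++ '.' :: ex.toList)
       | none => String.ofList (D ++ ".SZ".toList)) := by
  obtain ⟨c0, c1, c2, c3, c4, c5, rfl⟩ :
      ∃ a b c d e f, D = [a, b, c, d, e, f] := by
    rcases D with _ | ⟨a, D⟩; · simp at hlen
    rcases D with _ | ⟨b, D⟩; · simp at hlen
    rcases D with _ | ⟨c, D⟩; · simp at hlen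
    rcases D with _ | ⟨d, D⟩; · simp at hlen
    rcases D with _ | ⟨e, D⟩; · simp at hlen
    rcases D with _ | ⟨f, D⟩; · simp at hlen
    rcases D with _ | ⟨g, D⟩
    · exact ⟨a, b, c, d, e, f, rfl⟩
    · simp at hlen
  have h0 := pv_digit10 (hdig c0 (by simp))
  have h1 := pv_digit10 (hdig c1 (by simp))
  have h2 := pv_digit10 (hdig c2 (by simp))
  rcases h0 with rfl | rfl | rfl | rfl | rfl | rfl | rfl | rfl | rfl | rfl <;>
    rcases h1 with rfl | rfl | rfl | rfl | rfl | rfl | rfl | rfl | rfl | rfl <;>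
      rcases h2 with rfl | rfl | rfl | rfl | rfl | rfl | rfl | rfl | rfl | rfl <;> rfl

-- ===== VERDICT (by name: the statement is the Claim_ definition above) =====
theorem to_ts_code_spec : Claim_equal_to_ts_code := by
  intro code _
  unfold Spec_to_ts_code
  simp only [to_ts_code, to_ts_code_alt]
  by_cases h : PySem.Str.isIn "." (PySem.Str.upper (PySem.Str.strip code)) = true
  · rw [if_pos h, if_pos h]
  · rw [if_neg h, if_neg h, pv_d_eq]
    set D := PySem.Chars.slice
      (PySem.Chars.zfill
        ((PySem.Str.upper (PySem.Str.strip code)).toList.filter PySem.Chars.isdigit) 6)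
      (some (-6)) none with hD
    have hlen : D.length = 6 := by
      rw [hD, pv_slice_neg6, List.length_drop, PySem.Chars.length_zfill]
      omega
    have hdig : ∀ c ∈ D, PySem.Chars.isdigit c = true := by
      intro c hc
      rw [hD, pv_slice_neg6] at hc
      rcases pv_mem_zfill (List.mem_of_mem_drop hc) with rfl | hmem
      · rfl
      · exact List.of_mem_filter hmem
    exact pv_classify D hlen hdig
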